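-- pv_equiv track=rewrite | github.com/tjj0502/LevyGAN | aux_functions.py | a_idx
-- ===== SOURCE A (Python) =====
-- def a_idx(i: int, j: int, _w_dim: int):
--     if i == j:
--         return None
--     idx = 0
--     for k in range(_w_dim):
--         for l in range(k + 1, _w_dim):
--             if (i == k and j == l) or (j == k and i == l):
--                 return idx
--             else:
--                 idx += 1
-- ===== SOURCE B (Python) =====
-- def a_idx(i: int, j: int, _w_dim: int):
--     a, b = (i, j) if i < j else (j, i)
--     if a == b or a < 0 or b >= _w_dim:
--         return None
--     return a * _w_dim - a * (a + 1) // 2 + (b - a - 1)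
-- ===== Notes on version B (the rewrite author's own statement) =====
-- stated objective: faster
-- what changed: Replaced the double loop over all k<l pairs with the closed-form triangular index a*w - a*(a+1)//2 + (b-a-1) for a=min(i,j), b=max(i,j), with an explicit range check returning None exactly when the loop would exhaust.
import Mathlib
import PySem

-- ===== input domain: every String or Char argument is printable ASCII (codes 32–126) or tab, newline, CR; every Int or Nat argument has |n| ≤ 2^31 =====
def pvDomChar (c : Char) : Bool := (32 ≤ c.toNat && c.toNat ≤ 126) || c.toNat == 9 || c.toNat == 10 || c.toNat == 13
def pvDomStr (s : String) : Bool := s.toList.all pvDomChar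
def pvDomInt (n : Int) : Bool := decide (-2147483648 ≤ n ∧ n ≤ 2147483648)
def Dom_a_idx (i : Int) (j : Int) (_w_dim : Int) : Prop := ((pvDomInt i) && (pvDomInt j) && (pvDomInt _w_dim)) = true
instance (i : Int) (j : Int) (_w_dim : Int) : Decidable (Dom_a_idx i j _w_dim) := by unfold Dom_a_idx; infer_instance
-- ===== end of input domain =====

-- B replaces A's quadratic scan over all k<l pairs by the closed-form triangular index (objective: faster).

-- ===== PORT A =====
-- inner loop: 'for l in ls: if match: return idx else idx += 1'; .inl = early return, .inr = fall-through idx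
def aIdxInner (i j k : Int) : List Int → Int → Sum Int Int
  | [], idx => .inr idx
  | l :: ls, idx =>
    if (i = k ∧ j = l) ∨ (j = k ∧ i = l) then .inl idx
    else aIdxInner i j k ls (idx + 1)

-- outer loop over k
def aIdxOuter (i j w : Int) : List Int → Int → Option Int
  | [], _ => none
  | k :: ks, idx =>
    match aIdxInner i j k (PySem.List.pyRange (k + 1) w 1) idx with
    | .inl r => some r
    | .inr idx' => aIdxOuter i j w ks idx'

def a_idx (i : Int) (j : Int) (_w_dim : Int) : Option Int :=
  if i = j then none
  else aIdxOuter i j _w_dim (PySem.List.pyRange 0 _w_dim 1) 0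

-- ===== PORT B =====
def a_idx_alt (i : Int) (j : Int) (_w_dim : Int) : Option Int :=
  let a := if i < j then i else j
  let b := if i < j then j else i
  if a = b ∨ a < 0 ∨ _w_dim ≤ b then none
  else some (a * _w_dim - PySem.Int.floordiv (a * (a + 1)) 2 + (b - a - 1))

-- ===== PRECONDITION & SPEC =====
def Spec_a_idx (i : Int) (j : Int) (_w_dim : Int) (out : Option Int) : Prop := out = a_idx_alt i j _w_dim
instance (i : Int) (j : Int) (_w_dim : Int) (out : Option Int) : Decidable (Spec_a_idx i j _w_dim out) := by unfold Spec_a_idx; infer_instance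

-- ===== CLAIM (what is proved, stated in full; the proofs are below) =====
def Claim_equal_a_idx : Prop := ∀ (i : Int) (j : Int) (_w_dim : Int), Dom_a_idx i j _w_dim → Spec_a_idx i j _w_dim (a_idx i j _w_dim)

-- ===== LEMMAS AND PROOFS =====

-- inner loop with no matching element: falls through with idx advanced by the length
theorem inner_no_match (i j k : Int) (ls : List Int) (idx : Int)
    (h : ∀ l ∈ ls, ¬((i = k ∧ j = l) ∨ (j = k ∧ i = l))) :
    aIdxInner i j k ls idx = .inr (idx + (ls.length : Int)) := by
  induction ls generalizing idx with
  | nil => simp [aIdxInner]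
  | cons l ls ih =>
    have hl := h l (List.mem_cons_self)
    rw [aIdxInner, if_neg hl, ih _ (fun x hx => h x (List.mem_cons_of_mem _ hx))]
    simp; ring

-- inner loop over range(m, w) when the match predicate is 'l = o' with m ≤ o < w
theorem inner_found (i j k o : Int)
    (hP : ∀ l, ((i = k ∧ j = l) ∨ (j = k ∧ i = l)) ↔ l = o) :
    ∀ (n : ℕ) (m idx : Int), (o - m).toNat = n → m ≤ o → o < w →
    aIdxInner i j k (PySem.List.pyRange m w 1) idx = .inl (idx + (o - m)) := by
  intro n
  induction n with
  | zero =>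
    intro m idx hn hmo how
    have hmo' : m = o := by omega
    rw [PySem.List.pyRange_one_cons (by omega), aIdxInner, if_pos ((hP m).mpr hmo')]
    congr 1; omega
  | succ n ih =>
    intro m idx hn hmo how
    have hlt : m < o := by omega
    rw [PySem.List.pyRange_one_cons (by omega), aIdxInner,
        if_neg (by rw [hP]; omega), ih (m + 1) (idx + 1) (by omega) (by omega) how]
    congr 1; omega

-- inner loop over range(m, w) when the match predicate is 'l = o' but o lies outside [m, w)
theorem inner_found_out (i j k o : Int)
    (hP : ∀ l, ((i = k ∧ j = l) ∨ (j = k ∧ i = l)) ↔ l = o)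
    (m idx : Int) (ho : o < m ∨ w ≤ o) :
    aIdxInner i j k (PySem.List.pyRange m w 1) idx = .inr (idx + ((PySem.List.pyRange m w 1).length : Int)) := by
  apply inner_no_match
  intro l hl
  rw [PySem.List.mem_pyRange_one] at hl
  rw [hP]; omega

-- row k never matches when k ∉ {a, b} (with {i, j} = {a, b})
theorem row_no_match (i j a b k : Int) (hiab : (i = a ∧ j = b) ∨ (i = b ∧ j = a))
    (hk : k ≠ a ∧ k ≠ b) (m idx : Int) :
    aIdxInner i j k (PySem.List.pyRange m w 1) idx = .inr (idx + ((PySem.List.pyRange m w 1).length : Int)) := by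
  apply inner_no_match
  intro l _
  rcases hiab with ⟨hi, hj⟩ | ⟨hi, hj⟩ <;> subst hi <;> subst hj <;> rintro (⟨h1, _⟩ | ⟨h1, _⟩) <;> omega

-- the outer loop, started at row m, when the pair (a, b) is findable: row a, offset b - a - 1
theorem outer_found (i j w a b : Int) (hab : a < b)
    (hiab : (i = a ∧ j = b) ∨ (i = b ∧ j = a)) :
    ∀ (n : ℕ) (m idx : Int), (w - m).toNat = n → m ≤ a → b < w →
    ∃ r, aIdxOuter i j w (PySem.List.pyRange m w 1) idx = some r ∧
         2 * r = 2 * idx + 2 * (a - m) * (w - 1) - a * (a - 1) + m * (m - 1) + 2 * (b - a - 1) := by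
  have hPa : ∀ l, ((i = a ∧ j = l) ∨ (j = a ∧ i = l)) ↔ l = b := by
    intro l
    rcases hiab with ⟨hi, hj⟩ | ⟨hi, hj⟩ <;> subst hi <;> subst hj <;> constructor <;> intro h
    · rcases h with ⟨_, h⟩ | ⟨h, _⟩ <;> omega
    · left; omega
    · rcases h with ⟨h, _⟩ | ⟨_, h⟩ <;> omega
    · right; omega
  intro n
  induction n with
  | zero => intro m idx hn hma hbw; omega
  | succ n ih =>
    intro m idx hn hma hbw
    have hmw : m < w := by omega
    rw [PySem.List.pyRange_one_cons hmw, aIdxOuter]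
    by_cases hma' : m = a
    · subst hma'
      rw [inner_found i j m b (by simpa using hPa) ((b - (m + 1)).toNat) (m + 1) idx rfl (by omega) hbw]
      exact ⟨idx + (b - (m + 1)), rfl, by ring⟩
    · rw [row_no_match i j a b m hiab (by omega) (m + 1) idx]
      have hlen : (((PySem.List.pyRange (m + 1) w 1).length : Nat) : Int) = w - m - 1 := by
        rw [PySem.List.length_pyRange_one]; omega
      obtain ⟨r, hr, hr2⟩ := ih (m + 1) (idx + ((PySem.List.pyRange (m + 1) w 1).length : Int))
        (by omega) (by omega) hbw
      refine ⟨r, hr, ?_⟩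
      rw [hlen] at hr2
      linear_combination hr2
-- the outer loop started at row m, when the pair cannot be found any more: exhausts to None
theorem outer_none (i j w a b : Int) (hab : a < b)
    (hiab : (i = a ∧ j = b) ∨ (i = b ∧ j = a)) :
    ∀ (n : ℕ) (m idx : Int), (w - m).toNat = n → (a < m ∨ w ≤ b) →
    aIdxOuter i j w (PySem.List.pyRange m w 1) idx = none := by
  have hPa : ∀ l, ((i = a ∧ j = l) ∨ (j = a ∧ i = l)) ↔ l = b := by
    intro l
    rcases hiab with ⟨hi, hj⟩ | ⟨hi, hj⟩ <;> subst hi <;> subst hj <;> constructor <;> intro h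
    · rcases h with ⟨_, h⟩ | ⟨h, _⟩ <;> omega
    · left; omega
    · rcases h with ⟨h, _⟩ | ⟨_, h⟩ <;> omega
    · right; omega
  have hPb : ∀ l, ((i = b ∧ j = l) ∨ (j = b ∧ i = l)) ↔ l = a := by
    intro l
    rcases hiab with ⟨hi, hj⟩ | ⟨hi, hj⟩ <;> subst hi <;> subst hj <;> constructor <;> intro h
    · rcases h with ⟨h, _⟩ | ⟨_, h⟩ <;> omega
    · right; omega
    · rcases h with ⟨_, h⟩ | ⟨h, _⟩ <;> omega
    · left; omega
  intro n
  induction n with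
  | zero =>
    intro m idx hn _
    rw [PySem.List.pyRange_one_eq_nil (by omega), aIdxOuter]
  | succ n ih =>
    intro m idx hn hcond
    by_cases hmw : m < w
    · rw [PySem.List.pyRange_one_cons hmw, aIdxOuter]
      have hinr : aIdxInner i j m (PySem.List.pyRange (m + 1) w 1) idx
          = .inr (idx + ((PySem.List.pyRange (m + 1) w 1).length : Int)) := by
        by_cases hma : m = a
        · subst hma
          exact inner_found_out i j m b (by simpa using hPa) (m + 1) idx (by omega)
        · by_cases hmb : m = b
          · subst hmb
            exact inner_found_out i j m a (by simpa using hPb) (m + 1) idx (by omega)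
          · exact row_no_match i j a b m hiab ⟨hma, hmb⟩ (m + 1) idx
      rw [hinr]
      exact ih (m + 1) _ (by omega) (by omega)
    · rw [PySem.List.pyRange_one_eq_nil (by omega), aIdxOuter]

-- ===== VERDICT (by name: the statement is the Claim_ definition above) =====
theorem a_idx_spec : Claim_equal_a_idx := by
  intro i j w _
  unfold Spec_a_idx a_idx a_idx_alt
  by_cases hij : i = j
  · subst hij
    simp
  · rw [if_neg hij]
    set a := if i < j then i else j with ha
    set b := if i < j then j else i with hb
    have hab : a < b := by rw [ha, hb]; split <;> omega
    have hiab : (i = a ∧ j = b) ∨ (i = b ∧ j = a) := by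
      rw [ha, hb]; split
      · left; exact ⟨rfl, rfl⟩
      · right; exact ⟨rfl, rfl⟩
    by_cases hgood : 0 ≤ a ∧ b < w
    · obtain ⟨r, hr, hr2⟩ := outer_found i j w a b hab hiab (w.toNat) 0 0 (by omega) hgood.1 hgood.2
      rw [hr, if_neg (by omega)]
      congr 1
      rw [PySem.Int.floordiv_eq_ediv_of_pos (by omega)]
      have hr2' : 2 * r = 2 * (a * w) - a * (a + 1) + 2 * (b - a - 1) := by
        linear_combination hr2
      have hpe : 2 * (a * (a + 1) / 2) = a * (a + 1) :=
        Int.two_mul_ediv_two_of_even (Int.even_mul_succ_self a)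
      generalize a * (a + 1) = p at hr2' hpe
      generalize a * w = q at hr2'
      omega
    · rw [outer_none i j w a b hab hiab (w.toNat) 0 0 (by omega) (by omega),
          if_pos (by omega)]
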